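-- pv_equiv track=rewrite | github.com/Pr0me97/purchasingRequestScript | RmbBigMaker.py | RmbBigMaker
-- ===== SOURCE A (Python) =====
-- def RmbBigMaker(number):
--     CnBigList = ['万', '仟', '佰', '拾', '']
--     CnBigNum = ['零', '壹', '贰', '叁', '肆', '伍', '陆', '柒', '捌', '玖']
--     if not number.isdigit():
--         return '请输入数字！'
--     elif len(number)>5:
--         return '请输入五位及以下的数字。'
--     elif number[0] is '0':
--         return '请输入正确数字！'
--     flag =  5 - len(number)
--     rmb = ''
--     zero_flag = True
--     for i in number:
--         if i=='0' and flag<5: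
--             zero_flag = False
--         else:
--             if not zero_flag:
--                 rmb = rmb + CnBigNum[int(0)]
--             rmb = rmb + CnBigNum[int(i)]+CnBigList[flag]
--             zero_flag = True
--         flag +=1
--
--     return rmb
-- ===== SOURCE B (Python) =====
-- def RmbBigMaker(number):
--     CnBigList = ['万', '仟', '佰', '拾', '']
--     CnBigNum = ['零', '壹', '贰', '叁', '肆', '伍', '陆', '柒', '捌', '玖']
--     if not number.isdigit():
--         return '请输入数字！'
--     if len(number) > 5:
--         return '请输入五位及以下的数字。'
--     if number[0] == '0':
--         return '请输入正确数字！'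
--     # first pass: raw string with a positional unit after each nonzero digit,
--     # a bare '零' for each zero digit
--     offset = 5 - len(number)
--     raw = ''
--     for j, d in enumerate(number):
--         if d == '0':
--             raw += '零'
--         else:
--             raw += CnBigNum[int(d)] + CnBigList[offset + j]
--     # second pass: collapse runs of '零' into one
--     out = []
--     for ch in raw:
--         if ch == '零' and out and out[-1] == '零':
--             continue
--         out.append(ch)
--     # drop trailing '零'
--     while out and out[-1] == '零':
--         out.pop()
--     return ''.join(out)
-- ===== Notes on version B (the rewrite author's own statement) =====
-- stated objective: alternative
-- what changed: A's single pass with a zero_flag state machine is replaced by two passes: build a raw string with one '零' per zero digit and numeral+unit per nonzero digit, then collapse runs of '零' and strip trailing '零'.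
import Mathlib
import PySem

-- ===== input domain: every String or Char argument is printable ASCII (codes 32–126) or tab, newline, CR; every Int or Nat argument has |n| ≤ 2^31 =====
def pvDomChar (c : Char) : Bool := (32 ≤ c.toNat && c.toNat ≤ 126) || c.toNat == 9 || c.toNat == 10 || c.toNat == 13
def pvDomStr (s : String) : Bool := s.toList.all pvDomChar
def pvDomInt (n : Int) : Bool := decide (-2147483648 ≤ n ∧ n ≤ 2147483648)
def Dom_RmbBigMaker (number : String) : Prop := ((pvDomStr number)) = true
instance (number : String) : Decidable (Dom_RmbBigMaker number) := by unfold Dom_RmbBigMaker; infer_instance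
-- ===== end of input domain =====

-- B replaces A's one-pass zero_flag state machine by two passes (build a raw string with
-- '零' per zero digit, then collapse runs of '零' and strip trailing '零'); objective:
-- alternative decomposition, same cost.

-- ===== PORT A =====
def pvCnBigList : List (List Char) := [['万'], ['仟'], ['佰'], ['拾'], []]
def pvCnBigNum : List (List Char) :=
  [['零'], ['壹'], ['贰'], ['叁'], ['肆'], ['伍'], ['陆'], ['柒'], ['捌'], ['玖']]
-- int(i) of a single character; in both programs it is only applied to digit chars
def pvIntOf (c : Char) : Int := (PySem.Int.ofStr? (String.ofList [c])).getD 0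

-- A's loop: state (rmb, zero_flag, flag), exactly as in the Python
def pvALoop : List Char → List Char → Bool → Int → List Char
  | [], rmb, _, _ => rmb
  | i :: rest, rmb, zeroFlag, flag =>
    if i == '0' && decide (flag < 5) then
      pvALoop rest rmb false (flag + 1)
    else
      let rmb1 := if !zeroFlag then rmb ++ (PySem.List.pyGet? pvCnBigNum 0).getD [] else rmb
      let rmb2 := rmb1 ++ (PySem.List.pyGet? pvCnBigNum (pvIntOf i)).getD []
                       ++ (PySem.List.pyGet? pvCnBigList flag).getD []
      pvALoop rest rmb2 true (flag + 1)

def RmbBigMaker (number : String) : String :=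
  if !(PySem.Str.strIsdigit number) then "请输入数字！"
  else if PySem.Str.len number > 5 then "请输入五位及以下的数字。"
  else if number.toList.head? == some '0' then "请输入正确数字！"
  else String.ofList (pvALoop number.toList [] true (5 - (number.toList.length : Int)))

-- ===== PORT B =====
-- first pass: raw chunks, '零' for a zero digit, numeral+unit for a nonzero digit
def pvRawLoop : List Char → Int → List Char
  | [], _ => []
  | d :: rest, k =>
    (if d == '0' then ['零']
     else (PySem.List.pyGet? pvCnBigNum (pvIntOf d)).getD []
          ++ (PySem.List.pyGet? pvCnBigList k).getD []) ++ pvRawLoop rest (k + 1)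

-- second pass: collapse runs of '零' (skip a '零' whenever out already ends in one)
def pvCollapse : List Char → List Char → List Char
  | [], out => out
  | ch :: rest, out =>
    if ch == '零' && out.getLast? == some '零' then pvCollapse rest out
    else pvCollapse rest (out ++ [ch])

-- drop trailing '零' (the while/pop loop)
def pvRstrip (out : List Char) : List Char := (out.reverse.dropWhile (· == '零')).reverse

def RmbBigMaker_alt (number : String) : String :=
  if !(PySem.Str.strIsdigit number) then "请输入数字！"
  else if PySem.Str.len number > 5 then "请输入五位及以下的数字。"
  else if number.toList.head? == some '0' then "请输入正确数字！"
  else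
    String.ofList (pvRstrip (pvCollapse
      (pvRawLoop number.toList (5 - (number.toList.length : Int))) []))

-- ===== PRECONDITION & SPEC =====
def Spec_RmbBigMaker (number : String) (out : String) : Prop := out = RmbBigMaker_alt number
instance (number : String) (out : String) : Decidable (Spec_RmbBigMaker number out) := by unfold Spec_RmbBigMaker; infer_instance

-- ===== CLAIM (what is proved, stated in full; the proofs are below) =====
def Claim_equal_RmbBigMaker : Prop := ∀ (number : String), Dom_RmbBigMaker number → Spec_RmbBigMaker number (RmbBigMaker number)

-- ===== LEMMAS AND PROOFS =====

-- the pending-zero suffix A's zero_flag stands for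
def pvZS (zf : Bool) : List Char := if zf then [] else ['零']

theorem pv_digit_mem (c : Char) (h : PySem.Chars.isdigit c = true) :
    c ∈ ['0', '1', '2', '3', '4', '5', '6', '7', '8', '9'] := by
  have hb : 48 ≤ c.toNat ∧ c.toNat ≤ 57 := by
    simp only [PySem.Chars.isdigit, Bool.and_eq_true, decide_eq_true_eq, Char.le_def] at h
    exact ⟨h.1, h.2⟩
  obtain ⟨h1, h2⟩ := hb
  have hofNat : c = Char.ofNat c.toNat := (Char.ofNat_toNat c).symm
  interval_cases hc : c.toNat <;> (rw [hofNat]; decide)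

set_option maxRecDepth 10000 in
theorem pv_num_zero : (PySem.List.pyGet? pvCnBigNum 0).getD [] = ['零'] := by decide

set_option maxRecDepth 100000 in
theorem pv_num_piece (c : Char) (hd : PySem.Chars.isdigit c = true) (h0 : c ≠ '0') :
    ∃ ch, (PySem.List.pyGet? pvCnBigNum (pvIntOf c)).getD [] = [ch] ∧ ch ≠ '零' := by
  have hm := pv_digit_mem c hd
  fin_cases hm
  · exact absurd rfl h0
  · exact ⟨'壹', by decide, by decide⟩
  · exact ⟨'贰', by decide, by decide⟩
  · exact ⟨'叁', by decide, by decide⟩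
  · exact ⟨'肆', by decide, by decide⟩
  · exact ⟨'伍', by decide, by decide⟩
  · exact ⟨'陆', by decide, by decide⟩
  · exact ⟨'柒', by decide, by decide⟩
  · exact ⟨'捌', by decide, by decide⟩
  · exact ⟨'玖', by decide, by decide⟩

theorem pv_unit_piece (flag : Int) (h0 : 0 ≤ flag) (h4 : flag ≤ 4) :
    ∀ ch ∈ (PySem.List.pyGet? pvCnBigList flag).getD [], ch ≠ '零' := by
  interval_cases flag
  · rw [show (PySem.List.pyGet? pvCnBigList (0:Int)).getD [] = ['万'] from by decide]
    intro ch h; simp at h; subst h; decide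
  · rw [show (PySem.List.pyGet? pvCnBigList (1:Int)).getD [] = ['仟'] from by decide]
    intro ch h; simp at h; subst h; decide
  · rw [show (PySem.List.pyGet? pvCnBigList (2:Int)).getD [] = ['佰'] from by decide]
    intro ch h; simp at h; subst h; decide
  · rw [show (PySem.List.pyGet? pvCnBigList (3:Int)).getD [] = ['拾'] from by decide]
    intro ch h; simp at h; subst h; decide
  · rw [show (PySem.List.pyGet? pvCnBigList (4:Int)).getD [] = [] from by decide]
    simp

theorem pv_last_ne (l X : List Char) (hne : X ≠ []) (hX : ∀ ch ∈ X, ch ≠ '零') :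
    (l ++ X).getLast? ≠ some '零' := by
  rw [List.getLast?_append_of_ne_nil _ hne]
  intro hcontra
  exact hX _ (List.mem_of_getLast? hcontra) rfl

theorem pv_rstrip_zs (l : List Char) (zf : Bool) (h : l.getLast? ≠ some '零') :
    pvRstrip (l ++ pvZS zf) = l := by
  have hdrop : l.reverse.dropWhile (· == '零') = l.reverse := by
    cases hrev : l.reverse with
    | nil => simp
    | cons a t =>
      have ha : a ≠ '零' := by
        have hl : l.getLast? = some a := by rw [← List.head?_reverse, hrev]; rfl
        intro e; exact h (e ▸ hl)
      simp [ha]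
  cases zf with
  | true => simp [pvRstrip, pvZS, hdrop]
  | false => simp [pvRstrip, pvZS, List.reverse_append, hdrop]

theorem pv_collapse_append (X : List Char) (hX : ∀ ch ∈ X, ch ≠ '零') :
    ∀ (raw out : List Char), pvCollapse (X ++ raw) out = pvCollapse raw (out ++ X) := by
  induction X with
  | nil => intro raw out; simp
  | cons a t ih =>
    intro raw out
    have ha : (a == '零') = false := by
      simp only [beq_eq_false_iff_ne]; exact hX a (List.mem_cons_self ..)
    simp only [List.cons_append, pvCollapse, ha, Bool.false_and, Bool.false_eq_true, if_false]
    rw [ih (fun ch hch => hX ch (List.mem_cons_of_mem _ hch))]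
    simp

theorem pv_collapse_zero_step (raw rmb : List Char) (zf : Bool)
    (h : rmb.getLast? ≠ some '零') :
    pvCollapse ('零' :: raw) (rmb ++ pvZS zf) = pvCollapse raw (rmb ++ pvZS false) := by
  cases zf with
  | true =>
    have hcond : (rmb.getLast? == some '零') = false := by simpa using h
    simp [pvCollapse, pvZS, hcond]
  | false =>
    have hlast : (rmb ++ pvZS false).getLast? = some '零' := by simp [pvZS]
    simp [pvCollapse, hlast]

theorem pv_main : ∀ (cs rmb : List Char) (zf : Bool) (flag : Int),
    flag + cs.length = 5 →
    0 ≤ flag →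
    (∀ c ∈ cs, PySem.Chars.isdigit c = true) →
    rmb.getLast? ≠ some '零' →
    pvALoop cs rmb zf flag = pvRstrip (pvCollapse (pvRawLoop cs flag) (rmb ++ pvZS zf)) := by
  intro cs
  induction cs with
  | nil =>
    intro rmb zf flag _ _ _ hlast
    simp only [pvALoop, pvRawLoop, pvCollapse]
    exact (pv_rstrip_zs rmb zf hlast).symm
  | cons c rest ih =>
    intro rmb zf flag hsum hfl hdig hlast
    simp only [List.length_cons] at hsum
    push_cast at hsum
    have hb : (0:Int) ≤ (rest.length : Int) := Int.natCast_nonneg _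
    have hflag5 : flag < 5 := by omega
    have hflag4 : flag ≤ 4 := by omega
    have hrest : ∀ x ∈ rest, PySem.Chars.isdigit x = true :=
      fun x hx => hdig x (List.mem_cons_of_mem _ hx)
    by_cases hc : c = '0'
    · subst hc
      simp only [pvALoop, pvRawLoop, beq_self_eq_true, Bool.true_and, hflag5, decide_true,
        if_true, List.singleton_append]
      rw [pv_collapse_zero_step _ _ _ hlast]
      exact ih rmb false (flag + 1) (by omega) (by omega) hrest hlast
    · obtain ⟨ch, hch, hchne⟩ := pv_num_piece c (hdig c (List.mem_cons_self ..)) hc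
      have hcfalse : (c == '0') = false := by simp [hc]
      have hU := pv_unit_piece flag hfl hflag4
      set U := (PySem.List.pyGet? pvCnBigList flag).getD [] with hUdef
      have hXne : ([ch] ++ U) ≠ [] := by simp
      have hXch : ∀ x ∈ ([ch] ++ U), x ≠ '零' := by
        intro x hx
        rcases List.mem_append.mp hx with hx | hx
        · simp at hx; subst hx; exact hchne
        · exact hU x hx
      have hrmb1 : (if !zf then rmb ++ (PySem.List.pyGet? pvCnBigNum 0).getD [] else rmb)
          = rmb ++ pvZS zf := by
        cases zf <;> simp [pvZS, pv_num_zero]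
      simp only [pvALoop, pvRawLoop, hcfalse, Bool.false_and, Bool.false_eq_true, if_false,
        hrmb1, hch]
      rw [show ([ch] ++ U) ++ pvRawLoop rest (flag + 1)
            = ([ch] ++ U) ++ pvRawLoop rest (flag + 1) from rfl,
        pv_collapse_append ([ch] ++ U) hXch]
      have hih := ih ((rmb ++ pvZS zf) ++ ([ch] ++ U)) true (flag + 1) (by omega) (by omega)
        hrest (pv_last_ne _ _ hXne hXch)
      rw [show pvZS true = [] from rfl, List.append_nil] at hih
      rw [← hUdef]
      simp only [List.append_assoc] at hih ⊢
      exact hih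

-- ===== VERDICT (by name: the statement is the Claim_ definition above) =====
theorem RmbBigMaker_spec : Claim_equal_RmbBigMaker := by
  intro number _
  unfold Spec_RmbBigMaker RmbBigMaker RmbBigMaker_alt
  split_ifs with h1 h2 h3
  · rfl
  · rfl
  · rfl
  · have hdig : PySem.Str.strIsdigit number = true := by
      revert h1; cases PySem.Str.strIsdigit number <;> simp
    have hall : ∀ c ∈ number.toList, PySem.Chars.isdigit c = true := by
      rw [PySem.Str.strIsdigit_eq] at hdig
      simp only [PySem.Chars.strIsdigit, Bool.and_eq_true, List.all_eq_true] at hdig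
      exact fun c hc => hdig.2 c hc
    have hlen : ¬ ((PySem.Str.len number : Int) > 5) := by exact_mod_cast h2
    rw [pv_main number.toList [] true (5 - (number.toList.length : Int))
      (by omega) (by
        have : (number.toList.length : Int) = (PySem.Str.len number : Int) := by
          simp [PySem.Str.len]
        omega) hall (by simp)]
    simp [pvZS]
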